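-- pv_equiv track=rewrite | github.com/Bruzzknock/VIOLETA-Framework | src/ui/pages/step3.py | parse_analogies
-- ===== SOURCE A (Python) =====
-- def parse_analogies(text: str) -> list[str]:
--     blocks: list[str] = []
--     current: list[str] = []
--     for line in text.strip().splitlines():
--         if line.startswith("Analogy"):
--             if current:
--                 blocks.append("\n".join(current).strip())
--                 current = []
--         current.append(line)
--     if current:
--         blocks.append("\n".join(current).strip())
--     return [b for b in blocks if b]
-- ===== SOURCE B (Python) =====
-- def parse_analogies(text: str) -> list[str]:
--     lines = text.strip().splitlines()
--     bounds = [i for i, line in enumerate(lines) if line.startswith("Analogy")]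
--     blocks = ["\n".join(lines[s:e]).strip()
--               for s, e in zip([0] + bounds, bounds + [len(lines)])]
--     return [b for b in blocks if b]
-- ===== Notes on version B (the rewrite author's own statement) =====
-- stated objective: alternative
-- what changed: Replaced the flush-on-boundary fold with mutable accumulator state by a two-phase index-then-slice pass: collect boundary indices of 'Analogy' lines, then build each block by joining a slice between consecutive boundaries.
import Mathlib
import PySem

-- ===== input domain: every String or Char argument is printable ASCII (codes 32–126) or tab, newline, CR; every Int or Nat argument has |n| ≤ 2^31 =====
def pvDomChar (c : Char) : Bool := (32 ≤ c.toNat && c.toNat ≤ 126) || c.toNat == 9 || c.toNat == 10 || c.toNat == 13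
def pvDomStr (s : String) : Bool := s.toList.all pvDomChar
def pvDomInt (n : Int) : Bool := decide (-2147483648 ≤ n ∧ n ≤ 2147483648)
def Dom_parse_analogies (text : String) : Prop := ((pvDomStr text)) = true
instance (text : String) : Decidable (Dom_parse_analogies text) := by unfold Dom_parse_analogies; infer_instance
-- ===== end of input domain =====

-- B replaces A's flush-on-boundary accumulator loop by an index-then-slice two-phase pass (alternative decomposition, same cost).

-- ===== PORT A =====
-- A's loop body: flush current on an "Analogy" line, then append the line to current.
def pvStepA (st : List String × List String) (line : String) : List String × List String :=
  let st :=
    if PySem.Str.startswith line "Analogy" then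
      if st.2 ≠ [] then
        (st.1 ++ [PySem.Str.strip (PySem.Str.join "\n" st.2)], ([] : List String))
      else st
    else st
  (st.1, st.2 ++ [line])

def parse_analogies (text : String) : List String :=
  let st := (PySem.Str.splitlines (PySem.Str.strip text)).foldl pvStepA ([], [])
  let blocks := if st.2 ≠ [] then st.1 ++ [PySem.Str.strip (PySem.Str.join "\n" st.2)] else st.1
  blocks.filter (fun b => b != "")

-- ===== PORT B =====
def parse_analogies_alt (text : String) : List String :=
  let lines := PySem.Str.splitlines (PySem.Str.strip text)
  let bounds := ((PySem.List.enumerate lines 0).filter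
      (fun p => PySem.Str.startswith p.2 "Analogy")).map (·.1)
  let blocks := (((0 : Int) :: bounds).zip (bounds ++ [(lines.length : Int)])).map
      (fun p => PySem.Str.strip (PySem.Str.join "\n" (PySem.List.slice lines (some p.1) (some p.2))))
  blocks.filter (fun b => b != "")

-- ===== PRECONDITION & SPEC =====
def Spec_parse_analogies (text : String) (out : List String) : Prop := out = parse_analogies_alt text
instance (text : String) (out : List String) : Decidable (Spec_parse_analogies text out) := by unfold Spec_parse_analogies; infer_instance

-- ===== CLAIM (what is proved, stated in full; the proofs are below) =====
def Claim_equal_parse_analogies : Prop := ∀ (text : String), Dom_parse_analogies text → Spec_parse_analogies text (parse_analogies text)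

-- ===== LEMMAS AND PROOFS =====

def pvIsB (l : String) : Bool := PySem.Str.startswith l "Analogy"

def pvF (cur : List String) : String := PySem.Str.strip (PySem.Str.join "\n" cur)

-- A's semantics as a recursion: segments, skipping an empty current.
def pvSegs (cur : List String) : List String → List (List String)
  | [] => if cur = [] then [] else [cur]
  | l :: ls =>
    if pvIsB l then
      (if cur = [] then pvSegs [l] ls else cur :: pvSegs [l] ls)
    else pvSegs (cur ++ [l]) ls

-- B's semantics as a recursion: segments, the first one possibly empty.
def pvCuts (pre : List String) : List String → List (List String)
  | [] => [pre]
  | l :: ls => if pvIsB l then pre :: pvCuts [l] ls else pvCuts (pre ++ [l]) ls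

-- boundary indices of ls, offset by j
def pvNb (j : Nat) : List String → List Nat
  | [] => []
  | l :: ls => (if pvIsB l then [j] else []) ++ pvNb (j + 1) ls

theorem pvF_nil : pvF [] = "" := by decide

theorem pvStepA_eq (b c : List String) (l : String) :
    pvStepA (b, c) l =
      if pvIsB l then (if c = [] then (b, c ++ [l]) else (b ++ [pvF c], [l])) else (b, c ++ [l]) := by
  by_cases hb : pvIsB l = true <;> by_cases h : c = [] <;>
    (simp only [pvIsB] at hb; simp at hb; simp [pvStepA, pvIsB, pvF, hb, h])

theorem pvCuts_eq_segs (ls : List String) (pre : List String) (h : pre ≠ []) :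
    pvCuts pre ls = pvSegs pre ls := by
  induction ls generalizing pre with
  | nil => simp [pvCuts, pvSegs, h]
  | cons l ls ih =>
    simp only [pvCuts, pvSegs, h]
    by_cases hb : pvIsB l
    · simp [hb, ih [l] (by simp)]
    · simp [hb, ih (pre ++ [l]) (by simp)]

theorem pvCuts_nil_eq (ls : List String) :
    pvCuts [] ls = (match ls with
      | [] => [([] : List String)]
      | l :: _ => if pvIsB l then [[]] else []) ++ pvSegs [] ls := by
  cases ls with
  | nil => simp [pvCuts, pvSegs]
  | cons l ls =>
    by_cases hb : pvIsB l
    · simp [pvCuts, pvSegs, hb, pvCuts_eq_segs ls [l] (by simp)]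
    · simp [pvCuts, pvSegs, hb, pvCuts_eq_segs ls [l] (by simp)]

-- A's fold equals pvSegs
theorem pvFoldA (ls : List String) (blocks cur : List String) :
    (if (ls.foldl pvStepA (blocks, cur)).2 ≠ [] then
        (ls.foldl pvStepA (blocks, cur)).1 ++ [pvF (ls.foldl pvStepA (blocks, cur)).2]
      else (ls.foldl pvStepA (blocks, cur)).1)
    = blocks ++ (pvSegs cur ls).map pvF := by
  induction ls generalizing blocks cur with
  | nil => by_cases h : cur = [] <;> simp [pvSegs, h, pvF]
  | cons l ls ih =>
    rw [List.foldl_cons, pvStepA_eq]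
    by_cases hb : pvIsB l
    · by_cases h : cur = []
      · rw [if_pos hb, if_pos h, ih]
        simp [pvSegs, hb, h]
      · rw [if_pos hb, if_neg h, ih]
        simp [pvSegs, hb, h]
    · rw [if_neg hb, ih]
      simp [pvSegs, hb]

-- the port's enumerate/filter/map bound list equals pvNb (cast to Int)
theorem pvBounds (ls : List String) (j : Nat) :
    ((PySem.List.enumerate ls ((j : Nat) : Int)).filter
        (fun p => PySem.Str.startswith p.2 "Analogy")).map (·.1)
    = (pvNb j ls).map (fun n : Nat => (n : Int)) := by
  induction ls generalizing j with
  | nil => simp [PySem.List.enumerate_nil, pvNb]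
  | cons l ls ih =>
    rw [PySem.List.enumerate_cons]
    have hc : ((j : Nat) : Int) + 1 = (((j + 1 : Nat) : Nat) : Int) := by push_cast; ring
    rw [List.filter_cons, hc]
    by_cases hb : pvIsB l
    · have hb' : (PySem.Str.startswith l "Analogy") = true := hb
      simp only [hb', if_pos, List.map_cons, ih, pvNb, pvIsB]
      simp
    · have hb' : (PySem.Str.startswith l "Analogy") = false := by
        simpa [pvIsB] using hb
      simp only [hb', Bool.false_eq_true, if_false, ih, pvNb, pvIsB]
      simp

-- the central slicing lemma: slices between consecutive boundaries are pvCuts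
theorem pvSliceCuts (ls : List String) : ∀ (ctx pre : List String) (j n : Nat),
    j = ctx.length + pre.length → n = j + ls.length →
    (((ctx.length :: pvNb j ls).zip (pvNb j ls ++ [n])).map
      (fun p : Nat × Nat => (((ctx ++ pre ++ ls).drop p.1).take (p.2 - p.1))))
    = pvCuts pre ls := by
  induction ls with
  | nil =>
    intro ctx pre j n hj hn
    simp only [List.length_nil] at hn
    have he : n - ctx.length = pre.length := by omega
    simp [pvNb, pvCuts, he]
  | cons l ls ih =>
    intro ctx pre j n hj hn
    by_cases hb : pvIsB l
    · have h1 : pvNb j (l :: ls) = j :: pvNb (j + 1) ls := by simp [pvNb, hb]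
      have hfirst : (((ctx ++ pre ++ l :: ls).drop ctx.length).take (j - ctx.length)) = pre := by
        rw [List.append_assoc, List.drop_left]
        have : j - ctx.length = pre.length := by omega
        rw [this, List.take_left]
      have htail := ih (ctx ++ pre) [l] (j + 1) n
        (by simp; omega) (by simp at hn ⊢; omega)
      have hlen : (ctx ++ pre).length = j := by simp; omega
      rw [hlen] at htail
      have hlist : (ctx ++ pre) ++ [l] ++ ls = ctx ++ pre ++ l :: ls := by
        simp [List.append_assoc]
      rw [hlist] at htail
      rw [h1]
      simp only [List.cons_append]
      rw [List.zip_cons_cons, List.map_cons, hfirst, htail]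
      simp [pvCuts, hb]
    · have h1 : pvNb j (l :: ls) = pvNb (j + 1) ls := by simp [pvNb, hb]
      have htail := ih ctx (pre ++ [l]) (j + 1) n
        (by simp; omega) (by simp at hn ⊢; omega)
      have hlist : ctx ++ (pre ++ [l]) ++ ls = ctx ++ pre ++ l :: ls := by
        simp [List.append_assoc]
      rw [hlist] at htail
      rw [h1, htail]
      simp [pvCuts, hb]

-- filtering "" through pvF kills the possibly-empty leading pvCuts segment
theorem pvFilterCuts (ls : List String) :
    ((pvCuts [] ls).map pvF).filter (fun b => b != "")
    = ((pvSegs [] ls).map pvF).filter (fun b => b != "") := by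
  rw [pvCuts_nil_eq]
  cases ls with
  | nil => simp [pvSegs, pvF_nil]
  | cons l ls =>
    by_cases hb : pvIsB l
    · simp [hb, pvF_nil]
    · simp [hb]

-- ===== VERDICT (by name: the statement is the Claim_ definition above) =====
theorem parse_analogies_spec : Claim_equal_parse_analogies := by
  intro text _
  unfold Spec_parse_analogies parse_analogies parse_analogies_alt
  dsimp only
  generalize PySem.Str.splitlines (PySem.Str.strip text) = ls
  simp only [show ∀ c, PySem.Str.strip (PySem.Str.join "\n" c) = pvF c from fun _ => rfl]
  rw [pvFoldA ls [] [], List.nil_append]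
  have hb0 := pvBounds ls 0
  rw [show (((0 : Nat) : Int)) = (0 : Int) from by simp] at hb0
  rw [hb0]
  have hmap1 : ((0 : Int) :: (pvNb 0 ls).map (fun n : Nat => (n : Int)))
      = (0 :: pvNb 0 ls).map (fun n : Nat => (n : Int)) := by simp
  have hmap2 : ((pvNb 0 ls).map (fun n : Nat => (n : Int)) ++ [(ls.length : Int)])
      = (pvNb 0 ls ++ [ls.length]).map (fun n : Nat => (n : Int)) := by simp
  rw [hmap1, hmap2, List.zip_map, List.map_map]
  have hfun : ((fun p : Int × Int => pvF (PySem.List.slice ls (some p.1) (some p.2))) ∘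
        Prod.map (fun n : Nat => (n : Int)) (fun n : Nat => (n : Int)))
      = (fun p : Nat × Nat => pvF ((ls.drop p.1).take (p.2 - p.1))) := by
    funext p
    simp [Function.comp, Prod.map, PySem.List.slice_natCast]
  rw [hfun]
  have hcuts := pvSliceCuts ls [] [] 0 ls.length (by simp) (by simp)
  simp only [List.nil_append, List.length_nil] at hcuts
  rw [show (List.map (fun p : Nat × Nat => pvF ((ls.drop p.1).take (p.2 - p.1)))
        ((0 :: pvNb 0 ls).zip (pvNb 0 ls ++ [ls.length]))) = List.map pvF (pvCuts [] ls) from by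
      rw [← hcuts, List.map_map]; rfl]
  exact (pvFilterCuts ls).symm
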